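-- pv_equiv track=rewrite | github.com/jacobrussell-eng/Python-Tests | Codecademy Course challenges/Loops.py | sum_to_9000
-- ===== SOURCE A (Python) =====
-- def sum_to_9000(seq):
--     running_total = 0
--     for num in seq:
--         if running_total + num < 9000:
--             running_total += num
--         else:
--             break
--     return running_total
-- ===== SOURCE B (Python) =====
-- def sum_to_9000(seq):
--     # Pass 1: select elements while they fit into a shrinking budget.
--     budget = 9000
--     stack = []
--     for num in seq:
--         if num >= budget:
--             break
--         stack.append(num)
--         budget -= num
--     # Pass 2: sum the selected elements back-to-front off the stack.
--     total = 0
--     while stack: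
--         total += stack.pop()
--     return total
-- ===== Notes on version B (the rewrite author's own statement) =====
-- stated objective: alternative
-- what changed: Replaces the running-total loop with two staged passes over different state: a selection pass that decrements a remaining budget and pushes accepted elements onto a stack, then a pop loop that sums the stack back-to-front; no running total is maintained.
import Mathlib
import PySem

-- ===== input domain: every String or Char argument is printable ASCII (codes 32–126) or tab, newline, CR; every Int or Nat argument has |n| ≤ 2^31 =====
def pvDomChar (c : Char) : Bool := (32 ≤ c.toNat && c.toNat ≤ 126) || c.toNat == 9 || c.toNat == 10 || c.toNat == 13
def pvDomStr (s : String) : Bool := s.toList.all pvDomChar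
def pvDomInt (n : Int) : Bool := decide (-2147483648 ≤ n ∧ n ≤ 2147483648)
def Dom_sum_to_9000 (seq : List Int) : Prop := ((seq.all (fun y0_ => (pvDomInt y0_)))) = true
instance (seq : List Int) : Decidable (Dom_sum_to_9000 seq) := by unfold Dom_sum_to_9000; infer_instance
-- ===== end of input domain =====

-- ===== PORT A =====
-- B replaces the running-total loop with a budget-decrement selection pass onto a stack
-- plus a separate pop-and-sum pass; objective: alternative decomposition, same cost.
def sum_to_9000_loop : Int → List Int → Int
  | acc, [] => acc
  | acc, n :: rest => if acc + n < 9000 then sum_to_9000_loop (acc + n) rest else acc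

def sum_to_9000 (seq : List Int) : Int := sum_to_9000_loop 0 seq

-- ===== PORT B =====
-- pass 1: 'if num >= budget: break; stack.append(num); budget -= num'
def pvSelect : Int → List Int → List Int
  | _, [] => []
  | budget, n :: rest => if n ≥ budget then [] else n :: pvSelect (budget - n) rest

-- pass 2: 'while stack: total += stack.pop()' (pops from the BACK of the stack)
def pvPopSum (total : Int) (st : List Int) : Int :=
  match h : st.getLast? with
  | none => total
  | some x => pvPopSum (total + x) st.dropLast
termination_by st.length
decreasing_by
  cases st with
  | nil => simp at h
  | cons a t => simp [List.length_dropLast]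

def sum_to_9000_alt (seq : List Int) : Int := pvPopSum 0 (pvSelect 9000 seq)

-- ===== PRECONDITION & SPEC =====
def Spec_sum_to_9000 (seq : List Int) (out : Int) : Prop := out = sum_to_9000_alt seq
instance (seq : List Int) (out : Int) : Decidable (Spec_sum_to_9000 seq out) := by unfold Spec_sum_to_9000; infer_instance

-- ===== CLAIM (what is proved, stated in full; the proofs are below) =====
def Claim_equal_sum_to_9000 : Prop := ∀ (seq : List Int), Dom_sum_to_9000 seq → Spec_sum_to_9000 seq (sum_to_9000 seq)

-- ===== LEMMAS AND PROOFS =====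
theorem pvPopSum_eq_sum (st : List Int) : ∀ t : Int, pvPopSum t st = t + st.sum := by
  induction st using List.reverseRecOn with
  | nil => intro t; simp [pvPopSum]
  | append_singleton xs x ih =>
    intro t
    rw [pvPopSum]
    split
    · next hnone => simp at hnone
    · next y hsome =>
      have hy : y = x := by simpa using hsome.symm
      subst hy
      simp only [List.dropLast_concat]
      rw [ih]
      simp [List.sum_append]
      ring

theorem loop_eq_select (seq : List Int) : ∀ acc : Int,
    sum_to_9000_loop acc seq = acc + (pvSelect (9000 - acc) seq).sum := by
  induction seq with
  | nil => intro acc; simp [sum_to_9000_loop, pvSelect]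
  | cons n rest ih =>
    intro acc
    simp only [sum_to_9000_loop, pvSelect]
    by_cases h : acc + n < 9000
    · rw [if_pos h, if_neg (by omega), ih (acc + n)]
      simp only [List.sum_cons]
      have : 9000 - acc - n = 9000 - (acc + n) := by ring
      rw [this]; ring
    · rw [if_neg h, if_pos (by omega)]; simp

-- ===== VERDICT (by name: the statement is the Claim_ definition above) =====
theorem sum_to_9000_spec : Claim_equal_sum_to_9000 := by
  intro seq _
  unfold Spec_sum_to_9000 sum_to_9000 sum_to_9000_alt
  rw [pvPopSum_eq_sum, loop_eq_select]
  norm_num
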